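-- pv_equiv track=rewrite | github.com/oliver-nce/NCE_Events | nce_events/api/sql_eval.py | split_sql_code_and_string_literals
-- ===== SOURCE A (Python) =====
-- def split_sql_code_and_string_literals(expression: str) -> list[tuple[str, str]]:
-- 	"""
-- 	Split ``expression`` into alternating (``"code"``, text) and (``"str"``, text) segments.
-- 	String literals use single quotes; ``''`` is an escaped quote inside a string.
-- 	"""
-- 	out: list[tuple[str, str]] = []
-- 	i = 0
-- 	n = len(expression)
-- 	buf: list[str] = []
-- 	in_str = False
--
-- 	while i < n:
-- 		ch = expression[i]
-- 		if in_str: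
-- 			if ch == "'" and i + 1 < n and expression[i + 1] == "'":
-- 				buf.append("''")
-- 				i += 2
-- 				continue
-- 			if ch == "'":
-- 				in_str = False
-- 				out.append(("str", "".join(buf)))
-- 				buf = []
-- 				i += 1
-- 				continue
-- 			buf.append(ch)
-- 			i += 1
-- 			continue
-- 		if ch == "'":
-- 			if buf:
-- 				out.append(("code", "".join(buf)))
-- 				buf = []
-- 			in_str = True
-- 			i += 1
-- 			continue
-- 		buf.append(ch)
-- 		i += 1
--
-- 	if buf:
-- 		out.append(("code" if not in_str else "str", "".join(buf)))
-- 	return out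
-- ===== SOURCE B (Python) =====
-- def split_sql_code_and_string_literals(expression: str) -> list[tuple[str, str]]:
--     out: list[tuple[str, str]] = []
--     n = len(expression)
--     i = 0
--     while i < n:
--         j = expression.find("'", i)
--         if j == -1:
--             out.append(("code", expression[i:]))
--             return out
--         if j > i:
--             out.append(("code", expression[i:j]))
--         # string literal starting after the quote at j
--         k = j + 1
--         acc: list[str] = []
--         while True:
--             q = expression.find("'", k)
--             if q == -1:
--                 content = "".join(acc) + expression[k:]
--                 if content:
--                     out.append(("str", content))
--                 return out
--             if q + 1 < n and expression[q + 1] == "'":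
--                 acc.append(expression[k:q + 2])
--                 k = q + 2
--             else:
--                 acc.append(expression[k:q])
--                 out.append(("str", "".join(acc)))
--                 i = q + 1
--                 break
--     return out
-- ===== Notes on version B (the rewrite author's own statement) =====
-- stated objective: simpler
-- what changed: Replaced A's per-character state machine (in_str flag, char-by-char buf appends) by a str.find-based scanner that locates the next quote and slices out whole code/string segments at once.
import Mathlib
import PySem

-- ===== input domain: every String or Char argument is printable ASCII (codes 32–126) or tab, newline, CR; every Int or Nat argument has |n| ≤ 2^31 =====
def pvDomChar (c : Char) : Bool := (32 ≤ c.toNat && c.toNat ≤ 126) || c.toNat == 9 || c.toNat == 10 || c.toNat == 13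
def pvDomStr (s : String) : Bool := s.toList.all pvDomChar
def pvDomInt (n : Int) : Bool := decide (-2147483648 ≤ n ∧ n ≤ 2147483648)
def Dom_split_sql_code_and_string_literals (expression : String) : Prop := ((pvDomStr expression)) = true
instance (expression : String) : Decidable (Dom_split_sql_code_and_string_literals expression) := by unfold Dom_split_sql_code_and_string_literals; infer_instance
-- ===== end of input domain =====

-- B replaces A's per-character state machine by a find-the-next-quote scan that slices
-- whole code/string segments at once (objective: simpler decomposition, same cost).

-- ===== PORT A =====
-- A's while-loop over index i with state (out, buf, in_str); ported as recursion over the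
-- remaining characters, out produced by append/cons in emission order, buf kept in order
-- (buf.append ch → buf ++ [ch], "".join(buf) → String.ofList buf); the test
-- `i+1 < n and expression[i+1] == "'"` is rest.head? = some '\''.
def pvSplitA (l : List Char) (inStr : Bool) (buf : List Char) : List (String × String) :=
  match l with
  | [] => if buf ≠ [] then [((if !inStr then "code" else "str"), String.ofList buf)] else []
  | c :: rest =>
    if inStr then
      if c = '\'' ∧ rest.head? = some '\'' then
        pvSplitA rest.tail true (buf ++ ['\'', '\''])                  -- escaped '' inside string
      else if c = '\'' then
        ("str", String.ofList buf) :: pvSplitA rest false []           -- closing quote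
      else pvSplitA rest true (buf ++ [c])
    else
      if c = '\'' then
        (if buf ≠ [] then [("code", String.ofList buf)] else []) ++ pvSplitA rest true []
      else pvSplitA rest false (buf ++ [c])
termination_by l.length
decreasing_by all_goals (simp only [List.length_cons, List.length_tail]; omega)

def split_sql_code_and_string_literals (expression : String) : List (String × String) :=
  pvSplitA expression.toList false []

-- ===== PORT B =====
-- Source B's expression.find("'", i) + slice expression[i:j] on the remaining suffix are ported
-- as takeWhile/dropWhile of (· ≠ '\'') on that suffix (exact: find locates the first quote,
-- the slice is everything before it). Outer while-loop = pvSplitBCode, inner literal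
-- loop (with accumulator acc) = pvSplitBStr; `expression[q+1] == "'"` is r.head? = some '\''.
mutual
  -- the inner `while True` loop: acc = joined accumulator, l = suffix from position k
  def pvSplitBStr (acc : List Char) (l : List Char) : List (String × String) :=
    match h : l.dropWhile (· ≠ '\'') with
    | [] =>                                  -- find returned -1: unterminated string
        if acc ++ l.takeWhile (· ≠ '\'') ≠ [] then
          [("str", String.ofList (acc ++ l.takeWhile (· ≠ '\'')))]
        else []
    | _ :: r =>
        if r.head? = some '\'' then          -- doubled quote: keep '' literally, continue
          pvSplitBStr (acc ++ l.takeWhile (· ≠ '\'') ++ ['\'', '\'']) r.tail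
        else                                 -- closing quote
          ("str", String.ofList (acc ++ l.takeWhile (· ≠ '\''))) :: pvSplitBCode r
  termination_by l.length
  decreasing_by
    all_goals
      have hd := List.length_dropWhile_le (p := (· ≠ '\'')) (l := l)
      rw [h] at hd
      simp only [List.length_cons, List.length_tail] at hd ⊢
      omega

  -- the outer `while i < n` loop, l = suffix from position i
  def pvSplitBCode (l : List Char) : List (String × String) :=
    match l with
    | [] => []
    | a :: t =>
      match h : (a :: t).dropWhile (· ≠ '\'') with
      | [] => [("code", String.ofList ((a :: t).takeWhile (· ≠ '\'')))]  -- find -1: rest is code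
      | _ :: r =>
          (if (a :: t).takeWhile (· ≠ '\'') ≠ [] then
            [("code", String.ofList ((a :: t).takeWhile (· ≠ '\'')))]
          else []) ++ pvSplitBStr [] r
  termination_by l.length
  decreasing_by
    have hd := List.length_dropWhile_le (p := (· ≠ '\'')) (l := a :: t)
    rw [h] at hd; simp only [List.length_cons] at hd ⊢; omega
end

def split_sql_code_and_string_literals_alt (expression : String) : List (String × String) :=
  pvSplitBCode expression.toList

-- ===== PRECONDITION & SPEC =====
def Spec_split_sql_code_and_string_literals (expression : String) (out : List (String × String)) : Prop := out = split_sql_code_and_string_literals_alt expression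
instance (expression : String) (out : List (String × String)) : Decidable (Spec_split_sql_code_and_string_literals expression out) := by unfold Spec_split_sql_code_and_string_literals; infer_instance

-- ===== CLAIM (what is proved, stated in full; the proofs are below) =====
def Claim_equal_split_sql_code_and_string_literals : Prop := ∀ (expression : String), Dom_split_sql_code_and_string_literals expression → Spec_split_sql_code_and_string_literals expression (split_sql_code_and_string_literals expression)

-- ===== LEMMAS AND PROOFS =====

-- A consumes a quote-free prefix by appending it to buf (both modes at once)
theorem pvSplitA_prefix (code : List Char) (rest : List Char) (buf : List Char) (m : Bool)
    (hc : ∀ c ∈ code, c ≠ '\'') :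
    pvSplitA (code ++ rest) m buf = pvSplitA rest m (buf ++ code) := by
  induction code generalizing buf with
  | nil => simp
  | cons c cs ih =>
    have hne : c ≠ '\'' := hc c (by simp)
    rw [List.cons_append, pvSplitA.eq_def]
    simp only [hne, false_and, if_false]
    cases m with
    | true =>
      simp only [if_pos rfl]
      rw [ih _ (fun x hx => hc x (by simp [hx]))]; simp
    | false =>
      simp only [Bool.false_eq_true, if_false]
      rw [ih _ (fun x hx => hc x (by simp [hx]))]; simp

theorem pvTakeWhile_no_quote (l : List Char) : ∀ c ∈ l.takeWhile (· ≠ '\''), c ≠ '\'' := by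
  intro c hc
  simpa using List.mem_takeWhile_imp hc

theorem pvDropWhile_head (l : List Char) (x : Char) (r : List Char)
    (h : l.dropWhile (· ≠ '\'') = x :: r) : x = '\'' := by
  induction l with
  | nil => simp at h
  | cons a l ih =>
    rw [List.dropWhile_cons] at h
    by_cases ha : a = '\''
    · rw [if_neg (by simp [ha])] at h
      injection h with h1 _
      rw [← h1]; exact ha
    · rw [if_pos (by simp [ha])] at h
      exact ih h

-- main simultaneous induction: B's code scan = A in code mode with empty buf,
-- B's string scan with accumulator acc = A in string mode with buf = acc
theorem pvMain : ∀ n (l : List Char), l.length ≤ n →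
    (pvSplitBCode l = pvSplitA l false []) ∧
    (∀ acc, pvSplitBStr acc l = pvSplitA l true acc) := by
  intro n
  induction n with
  | zero =>
    intro l hl
    have hnil : l = [] := List.eq_nil_of_length_eq_zero (by omega)
    subst hnil
    constructor
    · unfold pvSplitBCode; rw [pvSplitA.eq_def]; simp
    · intro acc
      unfold pvSplitBStr
      rw [pvSplitA.eq_def]
      simp
  | succ n ih =>
    intro l hl
    have hsplit : l.takeWhile (· ≠ '\'') ++ l.dropWhile (· ≠ '\'') = l :=
      List.takeWhile_append_dropWhile
    have hlen := List.length_dropWhile_le (p := (· ≠ '\'')) (l := l)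
    constructor
    · -- code side
      cases hl0 : l with
      | nil => unfold pvSplitBCode; rw [pvSplitA.eq_def]; simp
      | cons a t =>
        unfold pvSplitBCode
        conv_rhs => rw [show (a :: t : List Char) =
          (a :: t).takeWhile (· ≠ '\'') ++ (a :: t).dropWhile (· ≠ '\'') from
          List.takeWhile_append_dropWhile.symm]
        rw [pvSplitA_prefix _ _ _ _ (pvTakeWhile_no_quote _)]
        split
        · -- dropWhile = []
          rename_i hd
          rw [hd, pvSplitA.eq_def]
          have hcode : (a :: t).takeWhile (· ≠ '\'') = a :: t := by
            have := @List.takeWhile_append_dropWhile _ (fun x => decide (x ≠ '\'')) (a :: t)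
            rw [hd] at this; simpa using this
          have ha : a ≠ '\'' := pvTakeWhile_no_quote (a :: t) a (by rw [hcode]; simp)
          simp [hcode, ha]
        · -- dropWhile = x :: r
          rename_i x r hd
          have hx : x = '\'' := pvDropWhile_head _ _ _ hd
          subst hx
          rw [hd, pvSplitA.eq_def]
          have hr : r.length ≤ n := by
            have := List.length_dropWhile_le (p := (· ≠ '\'')) (l := (a :: t))
            rw [hd] at this; simp at this
            rw [hl0] at hl; simp at hl
            omega
          simp only [Bool.false_eq_true, if_false, if_pos rfl, List.nil_append]
          rw [(ih r hr).2]
          simp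
    · -- string side
      intro acc
      unfold pvSplitBStr
      conv_rhs => rw [← hsplit]
      rw [pvSplitA_prefix _ _ _ _ (pvTakeWhile_no_quote _)]
      split
      · -- dropWhile = []
        rename_i hd
        rw [hd, pvSplitA.eq_def]
        simp
      · -- dropWhile = x :: r
        rename_i x r hd
        have hx : x = '\'' := pvDropWhile_head _ _ _ hd
        subst hx
        rw [hd, pvSplitA.eq_def]
        have hrlen : r.length < l.length := by
          rw [hd] at hlen; simp at hlen; omega
        simp only [if_pos rfl, true_and]
        by_cases hy : r.head? = some '\''
        · simp only [hy, if_pos rfl]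
          have hrt : r.tail.length ≤ n := by
            have := List.length_tail (l := r); omega
          rw [(ih r.tail hrt).2]
          simp
        · simp only [hy, if_neg hy, if_false]
          rw [(ih r (by omega)).1]
          simp

-- ===== VERDICT (by name: the statement is the Claim_ definition above) =====
theorem split_sql_code_and_string_literals_spec : Claim_equal_split_sql_code_and_string_literals := by
  intro expression _
  unfold Spec_split_sql_code_and_string_literals split_sql_code_and_string_literals split_sql_code_and_string_literals_alt
  exact ((pvMain expression.toList.length expression.toList le_rfl).1).symm
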